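-- pv_equiv track=rewrite | github.com/rajaditya-m/Interview-Prep | Interview/strings/something_gene.py | get_hash_value
-- ===== SOURCE A (Python) =====
-- def get_hash_value(s):
--     #length is constant 10
--     lookup_table = {'A':0, 'C':1, 'G':2, 'T':3}
--     multiplier = 1
--     ans = 0
--     for i in range(9,-1,-1):
--         val = lookup_table[s[i]]
--         ans += multiplier*val
--         multiplier *= 4
--     return ans
-- ===== SOURCE B (Python) =====
-- def get_hash_value(s):
--     # Two stages: spell out the base-4 numeral of the DNA prefix as a digit
--     # string, then delegate the positional arithmetic to int() parsing base 4.
--     lookup_table = {'A': 0, 'C': 1, 'G': 2, 'T': 3}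
--     digits = ''.join(str(lookup_table[s[i]]) for i in range(10))
--     return int(digits, 4)
-- ===== Notes on version B (the rewrite author's own statement) =====
-- stated objective: alternative
-- what changed: Replaces A's backward loop with an explicit power accumulator by two staged passes: a join of lookup digits builds the base-4 numeral string, and int(.., 4) performs all positional arithmetic.
import Mathlib
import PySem

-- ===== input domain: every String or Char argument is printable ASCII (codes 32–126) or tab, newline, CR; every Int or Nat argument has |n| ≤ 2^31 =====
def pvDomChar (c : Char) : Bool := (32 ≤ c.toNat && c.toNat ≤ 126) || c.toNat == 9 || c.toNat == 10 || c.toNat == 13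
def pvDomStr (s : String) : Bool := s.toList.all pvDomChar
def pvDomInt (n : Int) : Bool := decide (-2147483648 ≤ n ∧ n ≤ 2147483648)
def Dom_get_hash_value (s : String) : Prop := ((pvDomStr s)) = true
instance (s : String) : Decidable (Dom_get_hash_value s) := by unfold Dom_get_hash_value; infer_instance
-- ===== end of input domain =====

-- B replaces A's backward accumulator loop by two staged passes — join the lookup digits into a base-4 numeral string, then parse it with int(..,4) (alternative decomposition).


-- ===== PORT A =====
-- lookup_table[c]; Pre_ guarantees the key is present, so the default 0 is never used inside Pre_
def pvLookup (c : Char) : Int :=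
  (PySem.Dict.get? (PySem.Dict.ofList [('A', (0:Int)), ('C', 1), ('G', 2), ('T', 3)]) c).getD 0

-- s[i]; Pre_ guarantees 0 ≤ i < len(s), so the default is never used inside Pre_
def pvCharAt (s : String) (i : Int) : Char := (PySem.Str.pyGet? s i).getD 'A'

def get_hash_value (s : String) : Int :=
  -- for i in range(9,-1,-1): ans += multiplier * lookup_table[s[i]]; multiplier *= 4
  let st := (PySem.List.pyRange 9 (-1) (-1)).foldl
    (fun (st : Int × Int) i =>
      let val := pvLookup (pvCharAt s i)
      (st.1 * 4, st.2 + st.1 * val)) (1, 0)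
  st.2

-- ===== PORT B =====
-- int(t, 4) ported by hand as the base-4 digit parse over the chars of t; exact when t
-- is a nonempty string of digit chars '0'..'3', which is what stage 1 produces under Pre_
def pvParse4 (t : List Char) : Int :=
  t.foldl (fun a c => a * 4 + ((c.toNat : Int) - 48)) 0

def get_hash_value_alt (s : String) : Int :=
  -- digits = ''.join(str(lookup_table[s[i]]) for i in range(10)); return int(digits, 4)
  let digits := ((PySem.List.pyRange 0 10 1).map
    (fun i => (PySem.Int.toStr (pvLookup (pvCharAt s i))).toList)).flatten
  pvParse4 digits

-- ===== PRECONDITION & SPEC =====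
-- Pre_ excludes exactly the inputs on which A raises: strings shorter than 10 (IndexError)
-- and strings whose first 10 characters are not all in {A,C,G,T} (KeyError).
def Pre_get_hash_value (s : String) : Prop :=
  10 ≤ s.toList.length ∧
  ((s.toList.take 10).all (fun c => c == 'A' || c == 'C' || c == 'G' || c == 'T')) = true
instance (s : String) : Decidable (Pre_get_hash_value s) := by unfold Pre_get_hash_value; infer_instance
def pvWitness_get_hash_value : String := "ACGTACGTAC"

def Spec_get_hash_value (s : String) (out : Int) : Prop := out = get_hash_value_alt s
instance (s : String) (out : Int) : Decidable (Spec_get_hash_value s out) := by unfold Spec_get_hash_value; infer_instance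

-- ===== CLAIM (what is proved, stated in full; the proofs are below) =====
def Claim_equal_get_hash_value : Prop := ∀ (s : String), Dom_get_hash_value s → Pre_get_hash_value s → Spec_get_hash_value s (get_hash_value s)

-- ===== LEMMAS AND PROOFS =====

-- for an A/C/G/T letter, str(lookup_table[c]) is the single digit char of its value
theorem pvDigitChar (c : Char) (h : (c == 'A' || c == 'C' || c == 'G' || c == 'T') = true) :
    (PySem.Int.toStr (pvLookup c)).toList = [Char.ofNat (48 + (pvLookup c).toNat)] := by
  rcases Bool.or_eq_true_iff.1 h with h' | h'
  · rcases Bool.or_eq_true_iff.1 h' with h'' | h''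
    · rcases Bool.or_eq_true_iff.1 h'' with h3 | h3 <;>
        · rw [beq_iff_eq] at h3; subst h3; decide
    · rw [beq_iff_eq] at h''; subst h''; decide
  · rw [beq_iff_eq] at h'; subst h'; decide

-- and parsing that digit char back gives the looked-up value
theorem pvDigitVal (c : Char) (h : (c == 'A' || c == 'C' || c == 'G' || c == 'T') = true) :
    ((Char.ofNat (48 + (pvLookup c).toNat)).toNat : Int) = 48 + pvLookup c := by
  rcases Bool.or_eq_true_iff.1 h with h' | h'
  · rcases Bool.or_eq_true_iff.1 h' with h'' | h''
    · rcases Bool.or_eq_true_iff.1 h'' with h3 | h3 <;>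
        · rw [beq_iff_eq] at h3; subst h3; decide
    · rw [beq_iff_eq] at h''; subst h''; decide
  · rw [beq_iff_eq] at h'; subst h'; decide

theorem exists_ten (l : List Char) (h : 10 ≤ l.length) :
    ∃ c0 c1 c2 c3 c4 c5 c6 c7 c8 c9 rest,
      l = c0 :: c1 :: c2 :: c3 :: c4 :: c5 :: c6 :: c7 :: c8 :: c9 :: rest := by
  match l, h with
  | c0 :: c1 :: c2 :: c3 :: c4 :: c5 :: c6 :: c7 :: c8 :: c9 :: rest, _ =>
    exact ⟨c0, c1, c2, c3, c4, c5, c6, c7, c8, c9, rest, rfl⟩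

-- ===== VERDICT (by name: the statement is the Claim_ definition above) =====
theorem get_hash_value_spec : Claim_equal_get_hash_value := by
  intro s _ hpre
  obtain ⟨hlen, hall⟩ := hpre
  obtain ⟨c0, c1, c2, c3, c4, c5, c6, c7, c8, c9, rest, hL⟩ := exists_ten s.toList hlen
  rw [hL] at hall
  simp only [List.take, List.all_cons, List.all_nil, Bool.and_true, Bool.and_eq_true] at hall
  obtain ⟨h0, h1, h2, h3, h4, h5, h6, h7, h8, h9⟩ := hall
  have e0 : pvCharAt s 0 = c0 := by
    rw [pvCharAt, show (0:Int) = ((0:Nat):Int) from rfl, PySem.Str.pyGet?_natCast, hL]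
    simp
  have e1 : pvCharAt s 1 = c1 := by
    rw [pvCharAt, show (1:Int) = ((1:Nat):Int) from rfl, PySem.Str.pyGet?_natCast, hL]
    simp
  have e2 : pvCharAt s 2 = c2 := by
    rw [pvCharAt, show (2:Int) = ((2:Nat):Int) from rfl, PySem.Str.pyGet?_natCast, hL]
    simp
  have e3 : pvCharAt s 3 = c3 := by
    rw [pvCharAt, show (3:Int) = ((3:Nat):Int) from rfl, PySem.Str.pyGet?_natCast, hL]
    simp
  have e4 : pvCharAt s 4 = c4 := by
    rw [pvCharAt, show (4:Int) = ((4:Nat):Int) from rfl, PySem.Str.pyGet?_natCast, hL]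
    simp
  have e5 : pvCharAt s 5 = c5 := by
    rw [pvCharAt, show (5:Int) = ((5:Nat):Int) from rfl, PySem.Str.pyGet?_natCast, hL]
    simp
  have e6 : pvCharAt s 6 = c6 := by
    rw [pvCharAt, show (6:Int) = ((6:Nat):Int) from rfl, PySem.Str.pyGet?_natCast, hL]
    simp
  have e7 : pvCharAt s 7 = c7 := by
    rw [pvCharAt, show (7:Int) = ((7:Nat):Int) from rfl, PySem.Str.pyGet?_natCast, hL]
    simp
  have e8 : pvCharAt s 8 = c8 := by
    rw [pvCharAt, show (8:Int) = ((8:Nat):Int) from rfl, PySem.Str.pyGet?_natCast, hL]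
    simp
  have e9 : pvCharAt s 9 = c9 := by
    rw [pvCharAt, show (9:Int) = ((9:Nat):Int) from rfl, PySem.Str.pyGet?_natCast, hL]
    simp
  have g0 := pvDigitChar c0 h0
  have v0 := pvDigitVal c0 h0
  have g1 := pvDigitChar c1 h1
  have v1 := pvDigitVal c1 h1
  have g2 := pvDigitChar c2 h2
  have v2 := pvDigitVal c2 h2
  have g3 := pvDigitChar c3 h3
  have v3 := pvDigitVal c3 h3
  have g4 := pvDigitChar c4 h4
  have v4 := pvDigitVal c4 h4
  have g5 := pvDigitChar c5 h5
  have v5 := pvDigitVal c5 h5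
  have g6 := pvDigitChar c6 h6
  have v6 := pvDigitVal c6 h6
  have g7 := pvDigitChar c7 h7
  have v7 := pvDigitVal c7 h7
  have g8 := pvDigitChar c8 h8
  have v8 := pvDigitVal c8 h8
  have g9 := pvDigitChar c9 h9
  have v9 := pvDigitVal c9 h9
  unfold Spec_get_hash_value get_hash_value get_hash_value_alt pvParse4
  have hrange9 : PySem.List.pyRange 9 (-1) (-1) = [9,8,7,6,5,4,3,2,1,0] := by decide
  have hrange10 : PySem.List.pyRange 0 10 1 = [0,1,2,3,4,5,6,7,8,9] := by decide
  rw [hrange9, hrange10]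
  simp only [List.map, List.flatten, List.append, List.foldl, e0, e1, e2, e3, e4, e5, e6, e7,
    e8, e9, g0, g1, g2, g3, g4, g5, g6, g7, g8, g9, v0, v1, v2, v3, v4, v5, v6, v7, v8, v9]
  ring
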